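-- pv_equiv track=rewrite | github.com/RohitPatidar123-hub/Project_Computer_Science | Cryptanalysis_Of_Substitution_Cipher/Mine_Code/helper.py | getmapWordFromLargestToSmall
-- ===== SOURCE A (Python) =====
-- from collections import defaultdict
--
-- def getmapWordFromLargestToSmall(words):
--         """This function return dictionary where ket is int and value is set of string """
--         # Build the nested dictionary.
--         # Outer key: number of hyphens in the word.
--         # Inner key: length of the word.
--         # Value: list of words matching the criteria.
--         word_dict = defaultdict(lambda: defaultdict(list))  ## # of hyphen , length of letter , set
--         for word in words:
--             hyphen_count = word.count('-')
--             word_length = len(word)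
--             word_dict[hyphen_count][word_length].append(word)
--
--         # Create a new sorted dictionary.
--         # Outer keys (hyphen counts) will be sorted in ascending order.
--         # Inner keys (word lengths) will be sorted in descending order.
--         word_dict_sorted = {}
--         for hyphen_count in sorted(word_dict.keys()):
--             inner_dict_sorted = {}
--             for word_length in sorted(word_dict[hyphen_count].keys(), reverse=True):
--                 inner_dict_sorted[word_length] = word_dict[hyphen_count][word_length]
--             word_dict_sorted[hyphen_count] = inner_dict_sorted
--
--         return word_dict_sorted
-- ===== SOURCE B (Python) =====
-- def getmapWordFromLargestToSmall(words):
--     """Group words by hyphen count (ascending) then by length (descending)."""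
--     result = {}
--     for h in sorted({w.count('-') for w in words}):
--         group = [w for w in words if w.count('-') == h]
--         result[h] = {L: [w for w in group if len(w) == L]
--                      for L in sorted({len(w) for w in group}, reverse=True)}
--     return result
-- ===== Notes on version B (the rewrite author's own statement) =====
-- stated objective: simpler
-- what changed: Replaces the single-pass nested-defaultdict accumulation plus a separate key-sorting rebuild by a direct comprehension: sort the distinct hyphen counts (and, per group, the distinct lengths descending) and build each bucket with a filter over the input, so no intermediate mutable dict-of-dicts exists.
import Mathlib
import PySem

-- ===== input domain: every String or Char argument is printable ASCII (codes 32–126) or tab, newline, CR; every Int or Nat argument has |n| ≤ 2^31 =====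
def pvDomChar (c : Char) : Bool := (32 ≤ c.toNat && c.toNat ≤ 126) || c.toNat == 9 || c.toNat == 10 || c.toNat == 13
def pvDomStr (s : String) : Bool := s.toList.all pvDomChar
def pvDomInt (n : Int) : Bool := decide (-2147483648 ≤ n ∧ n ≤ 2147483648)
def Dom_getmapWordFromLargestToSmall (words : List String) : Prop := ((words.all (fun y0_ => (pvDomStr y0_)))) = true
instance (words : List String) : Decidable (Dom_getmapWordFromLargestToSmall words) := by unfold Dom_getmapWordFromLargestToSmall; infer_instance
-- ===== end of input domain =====

-- B replaces A's nested-defaultdict accumulation + sorted rebuild by a direct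
-- comprehension over sorted distinct keys with per-bucket filters (simpler decomposition).

-- ===== PORT A =====
-- word_dict[hyphen_count][word_length].append(word) on nested defaultdicts
def pvAStep (d : PySem.Dict Int (PySem.Dict Int (List String))) (w : String) :
    PySem.Dict Int (PySem.Dict Int (List String)) :=
  d.modify ((PySem.Str.count w "-" : Int)) PySem.Dict.empty
    (fun inner => inner.modify (PySem.Str.len w) [] (fun l => l ++ [w]))

def getmapWordFromLargestToSmall (words : List String) : List (Int × List (Int × List String)) :=
  let wd := words.foldl pvAStep PySem.Dict.empty
  (PySem.List.sorted wd.keys (fun x => x) false).foldl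
    (fun acc h =>
      let inner := wd.getD h PySem.Dict.empty
      acc ++ [(h,
        (PySem.List.sorted inner.keys (fun x => x) true).foldl
          (fun iacc L => iacc ++ [(L, inner.getD L [])]) [])])
    []

-- ===== PORT B =====
def getmapWordFromLargestToSmall_alt (words : List String) : List (Int × List (Int × List String)) :=
  (PySem.List.sorted (PySem.Set.ofList (words.map (fun w => (PySem.Str.count w "-" : Int)))) (fun x => x) false).map
    (fun h =>
      let group := words.filter (fun w => ((PySem.Str.count w "-" : Int) == h))
      (h,
        (PySem.List.sorted (PySem.Set.ofList (group.map (fun w => PySem.Str.len w))) (fun x => x) true).map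
          (fun L => (L, group.filter (fun w => (PySem.Str.len w == L))))))

-- ===== PRECONDITION & SPEC =====
def Spec_getmapWordFromLargestToSmall (words : List String) (out : List (Int × List (Int × List String))) : Prop := out = getmapWordFromLargestToSmall_alt words
instance (words : List String) (out : List (Int × List (Int × List String))) : Decidable (Spec_getmapWordFromLargestToSmall words out) := by unfold Spec_getmapWordFromLargestToSmall; infer_instance

-- ===== CLAIM (what is proved, stated in full; the proofs are below) =====
def Claim_equal_getmapWordFromLargestToSmall : Prop := ∀ (words : List String), Dom_getmapWordFromLargestToSmall words → Spec_getmapWordFromLargestToSmall words (getmapWordFromLargestToSmall words)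

-- ===== LEMMAS AND PROOFS =====

-- the bucket of the outer fold at h is the inner fold over the words whose count is h
lemma pvOuter_getD (ws : List String) (d : PySem.Dict Int (PySem.Dict Int (List String))) (h : Int) :
    (ws.foldl pvAStep d).getD h PySem.Dict.empty
      = (ws.filter (fun w => ((PySem.Str.count w "-" : Int) == h))).foldl
          (fun inner w => inner.modify (PySem.Str.len w) [] (fun l => l ++ [w]))
          (d.getD h PySem.Dict.empty) := by
  induction ws generalizing d with
  | nil => rfl
  | cons w ws ih =>
      simp only [List.foldl_cons, List.filter_cons, ih, pvAStep, PySem.Dict.getD_modify]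
      by_cases hc : (PySem.Str.count w "-" : Int) = h
      · subst hc; simp
      · simp only [PySem.Str.count] at hc
        simp at hc ⊢
        simp [hc, Ne.symm hc]

-- the inner fold's bucket at L is the length filter
lemma pvInner_getD (g : List String) (d : PySem.Dict Int (List String)) (L : Int) :
    (g.foldl (fun inner w => inner.modify (PySem.Str.len w) [] (fun l => l ++ [w])) d).getD L []
      = d.getD L [] ++ g.filter (fun w => (PySem.Str.len w == L)) := by
  induction g generalizing d with
  | nil => simp
  | cons w g ih =>
      simp only [List.foldl_cons, List.filter_cons, ih, PySem.Dict.getD_modify]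
      by_cases hl : PySem.Str.len w = L
      · rw [if_pos hl.symm]
        simp at hl
        simp [hl]
      · simp at hl
        simp [hl, Ne.symm hl]

-- ===== VERDICT (by name: the statement is the Claim_ definition above) =====
theorem getmapWordFromLargestToSmall_spec : Claim_equal_getmapWordFromLargestToSmall := by
  intro words _
  show getmapWordFromLargestToSmall words = getmapWordFromLargestToSmall_alt words
  simp only [getmapWordFromLargestToSmall, getmapWordFromLargestToSmall_alt]
  have hkeys : (words.foldl pvAStep PySem.Dict.empty).keys
      = PySem.Set.ofList (words.map (fun w => (PySem.Str.count w "-" : Int))) := by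
    have := PySem.Dict.keys_foldl_modify_key words
      (fun w => (PySem.Str.count w "-" : Int)) (PySem.Dict.empty)
      (fun _ w => fun inner => inner.modify (PySem.Str.len w) [] (fun l => l ++ [w]))
      PySem.Dict.empty
    simpa [pvAStep, PySem.Set.update_nil_left] using this
  rw [hkeys, PySem.List.foldl_append_singleton_eq_map]
  simp only [List.nil_append]
  apply List.map_congr_left
  intro h _
  have hbucket := pvOuter_getD words PySem.Dict.empty h
  rw [show (PySem.Dict.empty : PySem.Dict Int (PySem.Dict Int (List String))).getD h PySem.Dict.empty = PySem.Dict.empty from rfl] at hbucket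
  rw [hbucket]
  have hikeys : ((words.filter (fun w => ((PySem.Str.count w "-" : Int) == h))).foldl
      (fun inner w => inner.modify (PySem.Str.len w) [] (fun l => l ++ [w])) PySem.Dict.empty).keys
      = PySem.Set.ofList ((words.filter (fun w => ((PySem.Str.count w "-" : Int) == h))).map (fun w => PySem.Str.len w)) := by
    have := PySem.Dict.keys_foldl_modify_key (words.filter (fun w => ((PySem.Str.count w "-" : Int) == h)))
      (fun w => PySem.Str.len w) ([] : List String)
      (fun _ w => fun l => l ++ [w]) PySem.Dict.empty
    simpa [PySem.Set.update_nil_left] using this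
  rw [hikeys, PySem.List.foldl_append_singleton_eq_map]
  simp only [List.nil_append]
  refine congrArg (Prod.mk h) (List.map_congr_left ?_)
  intro L _
  have := pvInner_getD (words.filter (fun w => ((PySem.Str.count w "-" : Int) == h))) PySem.Dict.empty L
  simpa using this
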